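-- pv_equiv track=rewrite | github.com/heltonmaia/proj-question-generator | question_generator/questions_ch5_bk/question_ch5_0022.py | analisar_lista_numeros
-- ===== SOURCE A (Python) =====
-- from typing import List, Tuple
--
-- def analisar_lista_numeros(numeros: List[int]) -> Tuple[int, int, int]:
--     """
--     Analisa uma lista de números inteiros, retornando a soma,
--     a contagem de números pares e a contagem de números ímpares.
--
--     Args:
--         numeros: Uma lista de números inteiros.
--
--     Returns:
--         Uma tupla contendo (soma_total, quantidade_pares, quantidade_impares).
--     """
--     soma_total = 0
--     quantidade_pares = 0
--     quantidade_impares = 0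
--
--     for num in numeros:
--         soma_total += num
--         if num % 2 == 0:
--             quantidade_pares += 1
--         else:
--             quantidade_impares += 1
--
--     return soma_total, quantidade_pares, quantidade_impares
-- ===== SOURCE B (Python) =====
-- from typing import List, Tuple
--
-- def analisar_lista_numeros(numeros: List[int]) -> Tuple[int, int, int]:
--     # Divide-and-conquer: split the list in half, analyse each half
--     # recursively, and combine the (sum, evens, odds) triples by
--     # componentwise addition. Correct because all three statistics are
--     # additive over list concatenation.
--     if not numeros:
--         return (0, 0, 0)
--     if len(numeros) == 1:
--         r = numeros[0] % 2
--         return (numeros[0], 1 - r, r)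
--     mid = len(numeros) // 2
--     s1, p1, i1 = analisar_lista_numeros(numeros[:mid])
--     s2, p2, i2 = analisar_lista_numeros(numeros[mid:])
--     return (s1 + s2, p1 + p2, i1 + i2)
-- ===== Notes on version B (the rewrite author's own statement) =====
-- stated objective: alternative
-- what changed: Replaces A's single fused accumulator loop with a divide-and-conquer recursion: split the list at the midpoint, analyse each half recursively, and combine the (sum, evens, odds) triples componentwise; the singleton base case computes its triple from n % 2 directly.
import Mathlib
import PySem

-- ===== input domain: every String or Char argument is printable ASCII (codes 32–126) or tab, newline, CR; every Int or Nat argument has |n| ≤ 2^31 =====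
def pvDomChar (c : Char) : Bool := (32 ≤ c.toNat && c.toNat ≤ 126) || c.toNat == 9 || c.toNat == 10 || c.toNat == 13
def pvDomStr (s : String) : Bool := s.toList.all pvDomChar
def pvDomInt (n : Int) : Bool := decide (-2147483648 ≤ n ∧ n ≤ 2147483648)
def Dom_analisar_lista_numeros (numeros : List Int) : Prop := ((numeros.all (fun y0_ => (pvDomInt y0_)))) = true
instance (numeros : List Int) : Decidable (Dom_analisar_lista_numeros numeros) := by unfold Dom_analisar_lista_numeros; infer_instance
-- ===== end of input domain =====

-- B replaces A's fused single-pass accumulator loop with a divide-and-conquer recursion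
-- (split at the midpoint, combine the halves' triples componentwise); objective: alternative.

-- ===== PORT A =====
-- one pass, three accumulators updated together, branching on num % 2 == 0
def analisar_lista_numeros (numeros : List Int) : Int × Int × Int :=
  numeros.foldl
    (fun (st : Int × Int × Int) num =>
      let soma := st.1 + num
      if PySem.Int.mod num 2 = 0 then (soma, st.2.1 + 1, st.2.2)
      else (soma, st.2.1, st.2.2 + 1))
    (0, 0, 0)

-- ===== PORT B =====
-- divide and conquer; numeros[:mid] / numeros[mid:] with 0 ≤ mid ≤ len(numeros)
-- are exactly List.take mid / List.drop mid (clamped slice with in-range natural bounds)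
def analisar_lista_numeros_alt (numeros : List Int) : Int × Int × Int :=
  match numeros with
  | [] => (0, 0, 0)
  | [n] =>
      let r := PySem.Int.mod n 2
      (n, 1 - r, r)
  | a :: b :: t =>
      let mid := (a :: b :: t).length / 2
      let l := analisar_lista_numeros_alt ((a :: b :: t).take mid)
      let rres := analisar_lista_numeros_alt ((a :: b :: t).drop mid)
      (l.1 + rres.1, l.2.1 + rres.2.1, l.2.2 + rres.2.2)
  termination_by numeros.length
  decreasing_by
    · simp; omega
    · simp; omega

-- ===== PRECONDITION & SPEC =====
def Spec_analisar_lista_numeros (numeros : List Int) (out : Int × Int × Int) : Prop := out = analisar_lista_numeros_alt numeros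
instance (numeros : List Int) (out : Int × Int × Int) : Decidable (Spec_analisar_lista_numeros numeros out) := by unfold Spec_analisar_lista_numeros; infer_instance

-- ===== CLAIM (what is proved, stated in full; the proofs are below) =====
def Claim_equal_analisar_lista_numeros : Prop := ∀ (numeros : List Int), Dom_analisar_lista_numeros numeros → Spec_analisar_lista_numeros numeros (analisar_lista_numeros numeros)

-- ===== LEMMAS AND PROOFS =====

-- closed-form triple both ports compute
def pvSum (xs : List Int) : Int := xs.foldl (fun acc n => acc + n) 0
def pvPares (xs : List Int) : Int :=
  xs.foldl (fun acc n => if PySem.Int.mod n 2 = 0 then acc + 1 else acc) 0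

lemma sum_shift (t : List Int) (a : Int) :
    t.foldl (fun acc n => acc + n) a = a + pvSum t := by
  induction t generalizing a with
  | nil => simp [pvSum]
  | cons n t ih => simp only [pvSum, List.foldl_cons, zero_add]; rw [ih, ih n]; ring

lemma pares_shift (t : List Int) (a : Int) :
    t.foldl (fun acc n => if PySem.Int.mod n 2 = 0 then acc + 1 else acc) a = a + pvPares t := by
  induction t generalizing a with
  | nil => simp [pvPares]
  | cons n t ih =>
      simp only [pvPares, List.foldl_cons, zero_add]
      split_ifs with h
      · rw [ih, ih 1]; ring
      · rw [ih, ih 0]; simp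

lemma sum_append (l r : List Int) : pvSum (l ++ r) = pvSum l + pvSum r := by
  simp only [pvSum, List.foldl_append]; rw [sum_shift]; rfl

lemma pares_append (l r : List Int) : pvPares (l ++ r) = pvPares l + pvPares r := by
  simp only [pvPares, List.foldl_append]; rw [pares_shift]; rfl

lemma mod_two_cases (n : Int) : PySem.Int.mod n 2 = 0 ∨ PySem.Int.mod n 2 = 1 := by
  simp only [PySem.Int.mod]
  rw [Int.fmod_eq_emod]
  simp
  omega

lemma alt_char (xs : List Int) :
    analisar_lista_numeros_alt xs
      = (pvSum xs, pvPares xs, (xs.length : Int) - pvPares xs) := by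
  induction xs using analisar_lista_numeros_alt.induct with
  | case1 => simp [analisar_lista_numeros_alt, pvSum, pvPares]
  | case2 n =>
      rcases mod_two_cases n with h | h <;>
        simp only [analisar_lista_numeros_alt, pvSum, pvPares, List.foldl_cons,
          List.foldl_nil, h, List.length_cons, List.length_nil] <;>
        norm_num
  | case3 a b t mid ihl ihr =>
      simp only [show mid = (a :: b :: t).length / 2 from rfl] at ihl ihr
      rw [analisar_lista_numeros_alt, ihl, ihr]
      have hsplit : (a :: b :: t).take ((a :: b :: t).length / 2)
            ++ (a :: b :: t).drop ((a :: b :: t).length / 2) = a :: b :: t :=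
        List.take_append_drop _ _
      have hs : pvSum (a :: b :: t)
          = pvSum ((a :: b :: t).take ((a :: b :: t).length / 2))
            + pvSum ((a :: b :: t).drop ((a :: b :: t).length / 2)) := by
        conv_lhs => rw [← hsplit]
        exact sum_append _ _
      have hp : pvPares (a :: b :: t)
          = pvPares ((a :: b :: t).take ((a :: b :: t).length / 2))
            + pvPares ((a :: b :: t).drop ((a :: b :: t).length / 2)) := by
        conv_lhs => rw [← hsplit]
        exact pares_append _ _
      have hl : ((a :: b :: t).take ((a :: b :: t).length / 2)).length
            + ((a :: b :: t).drop ((a :: b :: t).length / 2)).length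
          = (a :: b :: t).length := by
        simp; omega
      have hlen : (((a :: b :: t).length : Int))
          = ((List.take ((a :: b :: t).length / 2) (a :: b :: t)).length : Int)
            + ((List.drop ((a :: b :: t).length / 2) (a :: b :: t)).length : Int) := by
        exact_mod_cast hl.symm
      refine Prod.ext (by rw [hs]) (Prod.ext (by rw [hp]) ?_)
      rw [hp, hlen]
      ring

lemma a_shift (numeros : List Int) (s p i : Int) :
    numeros.foldl
      (fun (st : Int × Int × Int) num =>
        let soma := st.1 + num
        if PySem.Int.mod num 2 = 0 then (soma, st.2.1 + 1, st.2.2)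
        else (soma, st.2.1, st.2.2 + 1))
      (s, p, i)
    = (s + pvSum numeros, p + pvPares numeros,
       i + ((numeros.length : Int) - pvPares numeros)) := by
  induction numeros generalizing s p i with
  | nil => simp [pvSum, pvPares]
  | cons n t ih =>
      have hs : pvSum (n :: t) = n + pvSum t := by
        show List.foldl _ (0 + n) t = _
        rw [sum_shift]; ring
      have hp : pvPares (n :: t)
          = (if PySem.Int.mod n 2 = 0 then (1 : Int) else 0) + pvPares t := by
        show List.foldl _ (if PySem.Int.mod n 2 = 0 then (0 : Int) + 1 else 0) t = _
        split_ifs with h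
        · rw [pares_shift]; ring
        · rw [pares_shift]
      simp only [List.foldl_cons]
      show List.foldl _ (if PySem.Int.mod n 2 = 0 then (s + n, p + 1, i)
            else (s + n, p, i + 1)) t = _
      split_ifs with h
      · rw [ih, hs, hp, if_pos h]
        refine Prod.ext (by ring) (Prod.ext (by ring) ?_)
        simp only [List.length_cons]
        push_cast
        ring
      · rw [ih, hs, hp, if_neg h]
        refine Prod.ext (by ring) (Prod.ext (by ring) ?_)
        simp only [List.length_cons]
        push_cast
        ring

-- ===== VERDICT (by name: the statement is the Claim_ definition above) =====
theorem analisar_lista_numeros_spec : Claim_equal_analisar_lista_numeros := by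
  intro numeros _
  show analisar_lista_numeros numeros = analisar_lista_numeros_alt numeros
  rw [alt_char]
  unfold analisar_lista_numeros
  rw [a_shift]
  refine Prod.ext (by ring) (Prod.ext (by ring) (by ring))
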